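-- pv_equiv track=rewrite | github.com/aidanq06/Trackify | fbla project/aidan's/prize2.py | assign_prize
-- ===== SOURCE A (Python) =====
-- def assign_prize(points):
--     # Prizes: each tuple represents (points threshold, prize)
--     prizes = [
--         (0, "N/A"),
--         (1, "Free snack from school store"),
--         (75, 'Free homework pass'),
--         (100, 'Free lunch and free snack'),
--         (125, 'Free entry to next school-related event'),
--         (150, 'Choice of any school-spirited apparel (hoodie, shirt, etc.)'),
--     ]
--     # Assign the highest prize the student's points qualify for
--     for threshold, prize in reversed(prizes):
--         if points >= threshold:
--             return prize
-- ===== SOURCE B (Python) =====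
-- def assign_prize(points):
--     thresholds = [0, 1, 75, 100, 125, 150]
--     prizes = [
--         "N/A",
--         "Free snack from school store",
--         'Free homework pass',
--         'Free lunch and free snack',
--         'Free entry to next school-related event',
--         'Choice of any school-spirited apparel (hoodie, shirt, etc.)',
--     ]
--     # binary search: rightmost insertion point of `points` in thresholds
--     lo, hi = 0, len(thresholds)
--     while lo < hi:
--         mid = (lo + hi) // 2
--         if points >= thresholds[mid]:
--             lo = mid + 1
--         else:
--             hi = mid
--     if lo == 0:
--         return None
--     return prizes[lo - 1]
-- ===== Notes on version B (the rewrite author's own statement) =====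
-- stated objective: alternative
-- what changed: Replaces the reversed linear scan over (threshold, prize) tuples with a hand-written binary search (bisect_right) over a sorted thresholds array parallel to a prizes array.
import Mathlib
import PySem

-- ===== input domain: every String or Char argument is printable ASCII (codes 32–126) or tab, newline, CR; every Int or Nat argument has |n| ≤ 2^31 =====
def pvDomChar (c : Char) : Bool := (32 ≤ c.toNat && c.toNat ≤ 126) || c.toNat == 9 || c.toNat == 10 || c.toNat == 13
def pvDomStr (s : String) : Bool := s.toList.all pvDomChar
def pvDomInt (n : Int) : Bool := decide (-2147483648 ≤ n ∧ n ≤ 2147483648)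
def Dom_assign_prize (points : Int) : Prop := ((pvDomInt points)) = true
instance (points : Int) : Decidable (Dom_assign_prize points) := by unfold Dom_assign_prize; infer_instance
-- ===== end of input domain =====

-- B replaces A's reversed linear scan of (threshold, prize) tuples with a binary search
-- (bisect_right) over a sorted thresholds array parallel to a prizes array (alternative, same cost).


-- ===== PORT A =====
def pvPrizesA : List (Int × String) := [
  (0, "N/A"),
  (1, "Free snack from school store"),
  (75, "Free homework pass"),
  (100, "Free lunch and free snack"),
  (125, "Free entry to next school-related event"),
  (150, "Choice of any school-spirited apparel (hoodie, shirt, etc.)")]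

-- the 'for … in reversed(prizes): if points >= threshold: return prize' loop
def pvLoopA (points : Int) : List (Int × String) → Option String
  | [] => none
  | (t, p) :: rest => if points ≥ t then some p else pvLoopA points rest

def assign_prize (points : Int) : String :=
  (pvLoopA points pvPrizesA.reverse).getD ""   -- Python returns None when the loop falls through (excluded by Pre_)

-- ===== PORT B =====
def pvThresholdsB : List Int := [0, 1, 75, 100, 125, 150]
def pvPrizesB : List String := [
  "N/A",
  "Free snack from school store",
  "Free homework pass",
  "Free lunch and free snack",
  "Free entry to next school-related event",
  "Choice of any school-spirited apparel (hoodie, shirt, etc.)"]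

-- the while-loop binary search (bisect_right); lo, hi are Nat indices into pvThresholdsB
def pvBisect (points : Int) (lo hi : Nat) : Nat :=
  if lo < hi then
    let mid := (lo + hi) / 2
    if points ≥ pvThresholdsB.getD mid 0 then pvBisect points (mid + 1) hi
    else pvBisect points lo mid
  else lo
termination_by hi - lo
decreasing_by all_goals omega

def assign_prize_alt (points : Int) : String :=
  let lo := pvBisect points 0 pvThresholdsB.length
  if lo = 0 then ""   -- Python returns None here (excluded by Pre_)
  else pvPrizesB.getD (lo - 1) ""

-- ===== PRECONDITION & SPEC =====
-- Pre_ excludes points < 0, where Python A's loop falls through and returns None (not a string).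
def Pre_assign_prize (points : Int) : Prop := 0 ≤ points
instance (points : Int) : Decidable (Pre_assign_prize points) := by unfold Pre_assign_prize; infer_instance
def pvWitness_assign_prize : Int := (80)

def Spec_assign_prize (points : Int) (out : String) : Prop := out = assign_prize_alt points
instance (points : Int) (out : String) : Decidable (Spec_assign_prize points out) := by unfold Spec_assign_prize; infer_instance

-- ===== CLAIM (what is proved, stated in full; the proofs are below) =====
def Claim_equal_assign_prize : Prop := ∀ (points : Int), Dom_assign_prize points → Pre_assign_prize points → Spec_assign_prize points (assign_prize points)

-- ===== LEMMAS AND PROOFS =====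

-- ===== VERDICT (by name: the statement is the Claim_ definition above) =====
theorem assign_prize_spec : Claim_equal_assign_prize := by
  intro points _ hpre
  unfold Spec_assign_prize assign_prize assign_prize_alt Pre_assign_prize at *
  rcases le_or_gt (150:Int) points with h150 | h150
  · have c100 : (100:Int) ≤ points := by omega
    simp [pvLoopA, pvPrizesA, pvBisect, pvThresholdsB, pvPrizesB, h150, c100]
  · rcases le_or_gt (125:Int) points with h125 | h125
    · have c100 : (100:Int) ≤ points := by omega
      simp [pvLoopA, pvPrizesA, pvBisect, pvThresholdsB, pvPrizesB, h125, c100, not_le.mpr h150]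
    · rcases le_or_gt (100:Int) points with h100 | h100
      · simp [pvLoopA, pvPrizesA, pvBisect, pvThresholdsB, pvPrizesB, h100, not_le.mpr h150, not_le.mpr h125]
      · rcases le_or_gt (75:Int) points with h75 | h75
        · have c1 : (1:Int) ≤ points := by omega
          simp [pvLoopA, pvPrizesA, pvBisect, pvThresholdsB, pvPrizesB, h75, c1, not_le.mpr h150, not_le.mpr h125, not_le.mpr h100]
        · rcases le_or_gt (1:Int) points with h1 | h1
          · simp [pvLoopA, pvPrizesA, pvBisect, pvThresholdsB, pvPrizesB, h1, not_le.mpr h150, not_le.mpr h125, not_le.mpr h100, not_le.mpr h75]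
          · simp [pvLoopA, pvPrizesA, pvBisect, pvThresholdsB, pvPrizesB, hpre, not_le.mpr h150, not_le.mpr h125, not_le.mpr h100, not_le.mpr h75, not_le.mpr h1]
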